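-- pv_equiv track=rewrite | github.com/soumalisen/DS-Python | Repetitive.py | replace_repetitivechars
-- ===== SOURCE A (Python) =====
-- def replace_repetitivechars(input_string):
--     result = ""
--     for i in range(len(input_string)):
--         if i > 0 and input_string[i] == input_string[i-1]:
--             result += "*"
--         else:
--             result += input_string[i]
--     return result
-- ===== SOURCE B (Python) =====
-- def replace_repetitivechars(input_string):
--     # Run-based: scan runs of equal characters, emit head char + '*' per repeat.
--     pieces = []
--     i, n = 0, len(input_string)
--     while i < n:
--         j = i + 1
--         while j < n and input_string[j] == input_string[i]:
--             j += 1
--         pieces.append(input_string[i] + "*" * (j - i - 1))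
--         i = j
--     return "".join(pieces)
-- ===== Notes on version B (the rewrite author's own statement) =====
-- stated objective: alternative
-- what changed: Rewrote the per-index predecessor comparison as a run-based scan: an outer loop advances over maximal runs of equal characters, emitting the run's first character followed by one asterisk per repeat, and joins the pieces at the end.
import Mathlib
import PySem

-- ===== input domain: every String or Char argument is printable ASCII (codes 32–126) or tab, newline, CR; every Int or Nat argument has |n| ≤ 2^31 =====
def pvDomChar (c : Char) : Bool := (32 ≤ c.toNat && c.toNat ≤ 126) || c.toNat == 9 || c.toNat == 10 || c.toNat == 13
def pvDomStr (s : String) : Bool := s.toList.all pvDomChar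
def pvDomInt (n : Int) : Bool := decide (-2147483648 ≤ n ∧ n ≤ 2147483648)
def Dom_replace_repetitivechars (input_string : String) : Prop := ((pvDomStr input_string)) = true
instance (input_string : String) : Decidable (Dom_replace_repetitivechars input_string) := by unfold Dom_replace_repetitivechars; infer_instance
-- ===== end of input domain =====

-- B replaces A's per-index predecessor comparison with a run-based scan (maximal runs of equal
-- characters, one asterisk per repeat); same return value, different loop structure (objective: alternative).

-- ===== PORT A =====
-- A: for i in range(len(s)): append an asterisk if i>0 and s[i]==s[i-1], else s[i]
def replace_repetitivechars (input_string : String) : String :=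
  String.mk ((PySem.List.pyRange 0 (input_string.toList.length : Int) 1).foldl
    (fun result i =>
      result ++ [if 0 < i ∧ PySem.List.pyGetD input_string.toList i ' '
                        = PySem.List.pyGetD input_string.toList (i - 1) ' '
                 then '*' else PySem.List.pyGetD input_string.toList i ' ']) [])

-- ===== PORT B =====
-- B's outer while loop over runs: emit run head, one asterisk per repeat, continue after the run.
def pvRuns : List Char → List Char
  | [] => []
  | c :: rest =>
      (c :: List.replicate (rest.takeWhile (· == c)).length '*') ++
        pvRuns (rest.dropWhile (· == c))
termination_by l => l.length
decreasing_by
  simp only [List.length_cons]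
  exact Nat.lt_succ_of_le (List.length_dropWhile_le _ _)

def replace_repetitivechars_alt (input_string : String) : String :=
  String.mk (pvRuns input_string.toList)

-- ===== PRECONDITION & SPEC =====
def Spec_replace_repetitivechars (input_string : String) (out : String) : Prop := out = replace_repetitivechars_alt input_string
instance (input_string : String) (out : String) : Decidable (Spec_replace_repetitivechars input_string out) := by unfold Spec_replace_repetitivechars; infer_instance

-- ===== CLAIM (what is proved, stated in full; the proofs are below) =====
def Claim_equal_replace_repetitivechars : Prop := ∀ (input_string : String), Dom_replace_repetitivechars input_string → Spec_replace_repetitivechars input_string (replace_repetitivechars input_string)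

-- ===== LEMMAS AND PROOFS =====

-- common spec: per-character output given the previous character
def pvStep : Char → List Char → List Char
  | _, [] => []
  | p, c :: r => (if c = p then '*' else c) :: pvStep c r

theorem pvRuns_nil : pvRuns [] = [] := by rw [pvRuns.eq_def]

theorem pvRuns_cons_eq (c : Char) (r : List Char) :
    pvRuns (c :: r) = (c :: List.replicate (r.takeWhile (· == c)).length '*') ++
      pvRuns (r.dropWhile (· == c)) := by rw [pvRuns.eq_def]

-- B side: pvRuns is pvStep from the head
theorem pvStep_eq_runs : ∀ (r : List Char) (c : Char),
    pvStep c r = List.replicate ((r.takeWhile (· == c)).length) '*' ++ pvRuns (r.dropWhile (· == c)) := by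
  intro r
  induction r with
  | nil => intro c; simp [pvStep, pvRuns_nil]
  | cons x r' ih =>
    intro c
    by_cases hx : x = c
    · subst hx
      simp [pvStep, List.takeWhile, List.dropWhile, List.replicate_succ, ih x]
    · have hb : (x == c) = false := by simp [hx]
      simp [pvStep, List.takeWhile, List.dropWhile, hb, hx, pvRuns_cons_eq, ih x]

theorem pvRuns_cons (c : Char) (r : List Char) : pvRuns (c :: r) = c :: pvStep c r := by
  rw [pvRuns_cons_eq, pvStep_eq_runs]; simp

-- A side: the mapped range from index k+1 is pvStep on the suffix
theorem pvMap_suffix (cs : List Char) : ∀ (d k : Nat), cs.length = k + d → k < cs.length →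
    (PySem.List.pyRange (((k : Nat) : Int) + 1) (cs.length : Int) 1).map
      (fun i => if 0 < i ∧ PySem.List.pyGetD cs i ' ' = PySem.List.pyGetD cs (i - 1) ' '
                 then '*' else PySem.List.pyGetD cs i ' ')
    = pvStep (cs.getD k ' ') (cs.drop (k + 1)) := by
  intro d
  induction d with
  | zero => intro k h hk; omega
  | succ d ih =>
    intro k h hk
    by_cases hlast : k + 1 = cs.length
    · rw [PySem.List.pyRange_one_eq_nil (by omega)]
      rw [List.drop_eq_nil_of_le (by omega)]
      simp [pvStep]
    · have hk1 : k + 1 < cs.length := by omega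
      have hstart : ((k : Nat) : Int) + 1 = (((k + 1 : Nat)) : Int) := by push_cast; ring
      rw [hstart]
      rw [PySem.List.pyRange_one_cons (by exact_mod_cast hk1)]
      rw [List.map_cons]
      have e1 : PySem.List.pyGetD cs ((k + 1 : Nat) : Int) ' ' = cs.getD (k + 1) ' ' :=
        PySem.List.pyGetD_natCast ..
      have e0 : PySem.List.pyGetD cs (((k + 1 : Nat) : Int) - 1) ' ' = cs.getD k ' ' := by
        have : (((k + 1 : Nat) : Int)) - 1 = ((k : Nat) : Int) := by push_cast; ring
        rw [this, PySem.List.pyGetD_natCast]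
      have hdrop : cs.drop (k + 1) = cs.getD (k + 1) ' ' :: cs.drop (k + 2) := by
        rw [List.getD_eq_getElem cs ' ' hk1, List.getElem_cons_drop]
      have ihx := ih (k + 1) (by omega) hk1
      rw [ihx, hdrop, e1, e0]
      simp [pvStep]

-- fold of singleton appends is a map (loop shape)
theorem pvA_eq_map (cs : List Char) :
    (PySem.List.pyRange 0 (cs.length : Int) 1).foldl
      (fun result i =>
        result ++ [if 0 < i ∧ PySem.List.pyGetD cs i ' ' = PySem.List.pyGetD cs (i - 1) ' '
                   then '*' else PySem.List.pyGetD cs i ' ']) []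
    = (PySem.List.pyRange 0 (cs.length : Int) 1).map
      (fun i => if 0 < i ∧ PySem.List.pyGetD cs i ' ' = PySem.List.pyGetD cs (i - 1) ' '
                 then '*' else PySem.List.pyGetD cs i ' ') := by
  rw [PySem.List.foldl_append_singleton_eq_map]; simp

theorem pvA_eq_runs (cs : List Char) :
    (PySem.List.pyRange 0 (cs.length : Int) 1).map
      (fun i => if 0 < i ∧ PySem.List.pyGetD cs i ' ' = PySem.List.pyGetD cs (i - 1) ' '
                 then '*' else PySem.List.pyGetD cs i ' ')
    = pvRuns cs := by
  cases cs with
  | nil => simp [pvRuns_nil, PySem.List.pyRange_one_eq_nil]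
  | cons c r =>
    have hlen : (0 : Int) < ((c :: r).length : Int) := by
      exact_mod_cast Nat.succ_pos r.length
    rw [PySem.List.pyRange_one_cons hlen, List.map_cons]
    have h0 : (0 : Int) + 1 = ((0 : Nat) : Int) + 1 := by norm_num
    rw [h0, pvMap_suffix (c :: r) (r.length + 1) 0 (by simp) (by simp)]
    rw [pvRuns_cons]
    simp [PySem.List.pyGetD_zero_cons]

-- ===== VERDICT (by name: the statement is the Claim_ definition above) =====
theorem replace_repetitivechars_spec : Claim_equal_replace_repetitivechars := by
  intro s _
  unfold Spec_replace_repetitivechars replace_repetitivechars replace_repetitivechars_alt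
  rw [pvA_eq_map, pvA_eq_runs]
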